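-- pv_equiv track=rewrite | github.com/jiancheng37/hacknroll | backend/vision_service.py | _calculate_outfit_completeness
-- ===== SOURCE A (Python) =====
-- from typing import Tuple, List, Dict
--
-- def _calculate_outfit_completeness(objects: List[str]) -> int:
--     score = 60  # Base score
--
--     # Define categories more rigorously
--     essential_items = {
--         'top': ['shirt', 'blouse', 't-shirt', 'sweater', 'jacket'],
--         'bottom': ['pants', 'skirt', 'shorts', 'jeans'],
--         'shoes': ['shoes', 'sneakers', 'boots', 'sandals'],
--         'accessories': ['bag', 'watch', 'jewelry', 'belt'],
--         'outerwear': ['coat', 'jacket', 'blazer']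
--     }
--
--     detected_categories = set()
--     for obj in objects:
--         for category, items in essential_items.items():
--             if obj in items and category not in detected_categories:
--                 detected_categories.add(category)
--                 score += 10
--
--     # Penalize incomplete outfits
--     if len(detected_categories) < 3:
--         score -= 20  # Reduce score for incomplete outfits
--
--     return min(100, score)
-- ===== SOURCE B (Python) =====
-- from typing import Tuple, List, Dict
--
-- def _calculate_outfit_completeness(objects: List[str]) -> int:
--     essential_items = {
--         'top': ['shirt', 'blouse', 't-shirt', 'sweater', 'jacket'],
--         'bottom': ['pants', 'skirt', 'shorts', 'jeans'],
--         'shoes': ['shoes', 'sneakers', 'boots', 'sandals'],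
--         'accessories': ['bag', 'watch', 'jewelry', 'belt'],
--         'outerwear': ['coat', 'jacket', 'blazer']
--     }
--     # reverse index: item -> categories it belongs to (in category order)
--     index = {}
--     for category, items in essential_items.items():
--         for item in items:
--             index.setdefault(item, []).append(category)
--
--     score = 60
--     detected = set()
--     for obj in objects:
--         for category in index.get(obj, ()):
--             if category not in detected:
--                 detected.add(category)
--                 score += 10
--
--     if len(detected) < 3:
--         score -= 20
--     return min(100, score)
-- ===== Notes on version B (the rewrite author's own statement) =====
-- stated objective: faster
-- what changed: Replaces the per-object rescan of all five category lists with a reverse index (item -> its categories) built once, then a single hash-lookup pass over objects; same detected-category set and score.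
import Mathlib
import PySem

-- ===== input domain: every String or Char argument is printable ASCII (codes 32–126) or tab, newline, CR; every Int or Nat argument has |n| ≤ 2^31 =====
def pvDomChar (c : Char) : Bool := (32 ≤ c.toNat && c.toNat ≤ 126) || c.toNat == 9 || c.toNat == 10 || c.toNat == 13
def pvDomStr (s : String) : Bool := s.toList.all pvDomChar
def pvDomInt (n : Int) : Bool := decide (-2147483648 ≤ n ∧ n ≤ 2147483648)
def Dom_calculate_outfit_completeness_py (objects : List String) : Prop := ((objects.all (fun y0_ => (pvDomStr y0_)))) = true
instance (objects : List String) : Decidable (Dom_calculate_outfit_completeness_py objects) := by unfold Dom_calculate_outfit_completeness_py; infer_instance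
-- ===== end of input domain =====

-- B replaces A's per-object scan of all five category lists by a reverse index
-- (item -> its categories) built once, then one lookup per object (idiomatic; same values).

-- ===== PORT A =====
-- the essential_items table (shared literal data of both Pythons)
def pvEssential : List (String × List String) :=
  [("top", ["shirt", "blouse", "t-shirt", "sweater", "jacket"]),
   ("bottom", ["pants", "skirt", "shorts", "jeans"]),
   ("shoes", ["shoes", "sneakers", "boots", "sandals"]),
   ("accessories", ["bag", "watch", "jewelry", "belt"]),
   ("outerwear", ["coat", "jacket", "blazer"])]

-- body of A's 'for obj in objects' loop: scan every (category, items) pair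
def pvStepA (st : PySem.Set String × Int) (obj : String) : PySem.Set String × Int :=
  pvEssential.foldl (fun st ci =>
    if ci.2.contains obj && !(st.1.contains ci.1) then
      (PySem.Set.add st.1 ci.1, st.2 + 10)
    else st) st

def calculate_outfit_completeness_py (objects : List String) : Int :=
  let res := objects.foldl pvStepA (PySem.Set.empty, 60)
  let score := if PySem.Set.len res.1 < 3 then res.2 - 20 else res.2
  min 100 score

-- ===== PORT B =====
-- reverse index: item -> list of categories, built once from the table
def pvIndexB : PySem.Dict String (List String) :=
  pvEssential.foldl
    (fun d ci => ci.2.foldl (fun d item => d.modify item [] (· ++ [ci.1])) d)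
    PySem.Dict.empty

-- body of B's 'for obj in objects' loop: one lookup, then add unseen categories
def pvStepB (d : PySem.Dict String (List String))
    (st : PySem.Set String × Int) (obj : String) : PySem.Set String × Int :=
  (d.getD obj []).foldl (fun st c =>
    if !(st.1.contains c) then (PySem.Set.add st.1 c, st.2 + 10) else st) st

def calculate_outfit_completeness_py_alt (objects : List String) : Int :=
  let res := objects.foldl (pvStepB pvIndexB) (PySem.Set.empty, 60)
  let score := if PySem.Set.len res.1 < 3 then res.2 - 20 else res.2
  min 100 score

-- ===== PRECONDITION & SPEC =====
def Spec_calculate_outfit_completeness_py (objects : List String) (out : Int) : Prop := out = calculate_outfit_completeness_py_alt objects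
instance (objects : List String) (out : Int) : Decidable (Spec_calculate_outfit_completeness_py objects out) := by unfold Spec_calculate_outfit_completeness_py; infer_instance

-- ===== CLAIM (what is proved, stated in full; the proofs are below) =====
def Claim_equal_calculate_outfit_completeness_py : Prop := ∀ (objects : List String), Dom_calculate_outfit_completeness_py objects → Spec_calculate_outfit_completeness_py objects (calculate_outfit_completeness_py objects)

-- ===== LEMMAS AND PROOFS =====

-- the reverse index evaluated to its literal value
lemma pvIndexB_eq : pvIndexB = PySem.Dict.mk
    [("shirt", ["top"]), ("blouse", ["top"]), ("t-shirt", ["top"]), ("sweater", ["top"]),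
     ("jacket", ["top", "outerwear"]),
     ("pants", ["bottom"]), ("skirt", ["bottom"]), ("shorts", ["bottom"]), ("jeans", ["bottom"]),
     ("shoes", ["shoes"]), ("sneakers", ["shoes"]), ("boots", ["shoes"]), ("sandals", ["shoes"]),
     ("bag", ["accessories"]), ("watch", ["accessories"]), ("jewelry", ["accessories"]),
     ("belt", ["accessories"]),
     ("coat", ["outerwear"]), ("blazer", ["outerwear"])] := by decide

-- the two per-object loop bodies agree for every object and loop state
lemma pvStep_eq (st : PySem.Set String × Int) (obj : String) :
    pvStepA st obj = pvStepB pvIndexB st obj := by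
  by_cases h1 : obj = "shirt"
  · subst h1; rfl
  by_cases h2 : obj = "blouse"
  · subst h2; rfl
  by_cases h3 : obj = "t-shirt"
  · subst h3; rfl
  by_cases h4 : obj = "sweater"
  · subst h4; rfl
  by_cases h5 : obj = "jacket"
  · subst h5; rfl
  by_cases h6 : obj = "pants"
  · subst h6; rfl
  by_cases h7 : obj = "skirt"
  · subst h7; rfl
  by_cases h8 : obj = "shorts"
  · subst h8; rfl
  by_cases h9 : obj = "jeans"
  · subst h9; rfl
  by_cases h10 : obj = "shoes"
  · subst h10; rfl
  by_cases h11 : obj = "sneakers"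
  · subst h11; rfl
  by_cases h12 : obj = "boots"
  · subst h12; rfl
  by_cases h13 : obj = "sandals"
  · subst h13; rfl
  by_cases h14 : obj = "bag"
  · subst h14; rfl
  by_cases h15 : obj = "watch"
  · subst h15; rfl
  by_cases h16 : obj = "jewelry"
  · subst h16; rfl
  by_cases h17 : obj = "belt"
  · subst h17; rfl
  by_cases h18 : obj = "coat"
  · subst h18; rfl
  by_cases h19 : obj = "blazer"
  · subst h19; rfl
  · rw [pvIndexB_eq]
    simp [pvStepA, pvStepB, pvEssential, PySem.Dict.getD,
      List.contains_eq_mem, h1, h2, h3, h4, h5, h6, h7, h8, h9, h10,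
      h11, h12, h13, h14, h15, h16, h17, h18, h19,
      Ne.symm h1, Ne.symm h2, Ne.symm h3, Ne.symm h4, Ne.symm h5, Ne.symm h6,
      Ne.symm h7, Ne.symm h8, Ne.symm h9, Ne.symm h10, Ne.symm h11, Ne.symm h12,
      Ne.symm h13, Ne.symm h14, Ne.symm h15, Ne.symm h16, Ne.symm h17, Ne.symm h18,
      Ne.symm h19, PySem.Dict.get?]

-- ===== VERDICT (by name: the statement is the Claim_ definition above) =====
theorem calculate_outfit_completeness_py_spec : Claim_equal_calculate_outfit_completeness_py := by
  intro objects _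
  unfold Spec_calculate_outfit_completeness_py
  unfold calculate_outfit_completeness_py calculate_outfit_completeness_py_alt
  have h : pvStepA = pvStepB pvIndexB := funext fun st => funext fun obj => pvStep_eq st obj
  rw [h]
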